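-- pv_equiv track=rewrite | github.com/collective-context/ccc | ccc-commander/lib-from-ccc/ccc_role_security.py | verify_role_command
-- ===== SOURCE A (Python) =====
-- def verify_role_command(command_string):
--     """
--     Verify that a role change command is legitimate
--     Returns True only for valid 'ccc session start' commands
--     """
--     valid_patterns = [
--         "ccc session start",
--         "ccc se start",
--         "ccc sess start",
--         "./ccc session start",
--         "./ccc se start",
--         "./ccc sess start"
--     ]
--
--     # Normalize command
--     cmd_lower = command_string.strip().lower()
--
--     # Check if it starts with any valid pattern
--     for pattern in valid_patterns:
--         if cmd_lower.startswith(pattern):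
--             return True
--
--     return False
-- ===== SOURCE B (Python) =====
-- def verify_role_command(command_string):
--     """
--     Verify that a role change command is legitimate
--     Returns True only for valid 'ccc session start' commands
--     """
--     cmd = command_string.strip().lower()
--     if cmd.startswith("./"):
--         cmd = cmd[2:]
--     return any(cmd.startswith(p)
--                for p in ("ccc session start", "ccc se start", "ccc sess start"))
-- ===== Notes on version B (the rewrite author's own statement) =====
-- stated objective: simpler
-- what changed: Instead of enumerating all 6 patterns (3 base patterns each with and without a dot-slash prefix), B removes exactly one leading dot-slash after normalization and checks only the 3 base patterns.
import Mathlib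
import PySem

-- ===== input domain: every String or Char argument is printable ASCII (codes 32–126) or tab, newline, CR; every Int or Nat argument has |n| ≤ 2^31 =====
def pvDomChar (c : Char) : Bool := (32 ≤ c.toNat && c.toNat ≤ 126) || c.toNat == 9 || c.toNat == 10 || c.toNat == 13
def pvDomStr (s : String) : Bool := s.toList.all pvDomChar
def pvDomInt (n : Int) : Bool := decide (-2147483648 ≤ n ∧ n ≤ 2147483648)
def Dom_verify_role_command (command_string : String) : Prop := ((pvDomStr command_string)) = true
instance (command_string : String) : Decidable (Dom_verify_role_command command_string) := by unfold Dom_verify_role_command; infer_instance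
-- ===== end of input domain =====

-- B factors the optional dot-slash prefix out of A's 6-pattern list: strip one leading occurrence then check the 3 base patterns (simpler).

-- ===== PORT A =====
-- the 'for pattern in valid_patterns: if cmd_lower.startswith(pattern): return True' loop
def pvLoopA : List String → String → Bool
  | [], _ => false
  | p :: ps, cmd => if PySem.Str.startswith cmd p then true else pvLoopA ps cmd

def verify_role_command (command_string : String) : Bool :=
  let valid_patterns : List String :=
    ["ccc session start", "ccc se start", "ccc sess start",
     "./ccc session start", "./ccc se start", "./ccc sess start"]
  let cmd_lower := PySem.Str.lower (PySem.Str.strip command_string)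
  pvLoopA valid_patterns cmd_lower

-- ===== PORT B =====
def verify_role_command_alt (command_string : String) : Bool :=
  let cmd := PySem.Str.lower (PySem.Str.strip command_string)
  let cmd := if PySem.Str.startswith cmd "./" then PySem.Str.slice cmd (some 2) none else cmd
  ["ccc session start", "ccc se start", "ccc sess start"].any
    (fun p => PySem.Str.startswith cmd p)

-- ===== PRECONDITION & SPEC =====
def Spec_verify_role_command (command_string : String) (out : Bool) : Prop := out = verify_role_command_alt command_string
instance (command_string : String) (out : Bool) : Decidable (Spec_verify_role_command command_string out) := by unfold Spec_verify_role_command; infer_instance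

-- ===== CLAIM (what is proved, stated in full; the proofs are below) =====
def Claim_equal_verify_role_command : Prop := ∀ (command_string : String), Dom_verify_role_command command_string → Spec_verify_role_command command_string (verify_role_command command_string)

-- ===== LEMMAS AND PROOFS =====

lemma pvLoopA_eq_any (ps : List String) (cmd : String) :
    pvLoopA ps cmd = ps.any (fun p => PySem.Str.startswith cmd p) := by
  induction ps with
  | nil => rfl
  | cons p ps ih =>
    simp only [pvLoopA, List.any_cons, ih]
    cases PySem.Str.startswith cmd p <;> simp

lemma startswith_toList (c p : String) :
    PySem.Str.startswith c p = true ↔ p.toList <+: c.toList := by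
  rw [PySem.Str.startswith_eq, PySem.Chars.startswith_iff]

-- the central fact: the 6-pattern check on c equals the 3-pattern check after removing one "./"
lemma core (c : String) :
    (["ccc session start", "ccc se start", "ccc sess start",
      "./ccc session start", "./ccc se start", "./ccc sess start"].any
        (fun p => PySem.Str.startswith c p)) =
    (["ccc session start", "ccc se start", "ccc sess start"].any
        (fun p => PySem.Str.startswith
            (if PySem.Str.startswith c "./" then PySem.Str.slice c (some 2) none else c) p)) := by
  by_cases h : PySem.Str.startswith c "./" = true
  · obtain ⟨t, ht⟩ := (startswith_toList c "./").mp h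
    have ht' : c.toList = '.' :: '/' :: t := by simpa using ht.symm
    have hsl : (PySem.Str.slice c (some 2) none).toList = t := by
      rw [PySem.Str.toList_slice, PySem.Chars.slice_eq_listSlice,
          PySem.List.slice_from _ (by norm_num : (0:Int) ≤ 2), ht']
      rfl
    simp only [h, if_true, List.any_cons, List.any_nil, Bool.or_false,
               PySem.Str.startswith_eq, hsl, ht']
    simp [PySem.Chars.startswith, List.isPrefixOf]
  · have hb : PySem.Str.startswith c "./" = false := Bool.eq_false_iff.mpr h
    have k : ∀ p : String, "./".toList <+: p.toList →
        PySem.Str.startswith c p = false := by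
      intro p hp
      rw [Bool.eq_false_iff]
      intro hk
      exact h ((startswith_toList c "./").mpr (hp.trans ((startswith_toList c p).mp hk)))
    have k1 := k "./ccc session start" (by decide)
    have k2 := k "./ccc se start" (by decide)
    have k3 := k "./ccc sess start" (by decide)
    simp only [hb, Bool.false_eq_true, if_false, List.any_cons, List.any_nil,
               Bool.or_false, k1, k2, k3]

-- ===== VERDICT (by name: the statement is the Claim_ definition above) =====
theorem verify_role_command_spec : Claim_equal_verify_role_command := by
  intro c _
  unfold Spec_verify_role_command verify_role_command verify_role_command_alt
  simp only [pvLoopA_eq_any]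
  exact core (PySem.Str.lower (PySem.Str.strip c))
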